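-- pv_equiv track=rewrite | github.com/HUFS-Programming-2022/Mingyu_201800430 | Weekly-Quiz/project_10.py | choose_word
-- ===== SOURCE A (Python) =====
-- def choose_word(extracted_words, name_dic):
--     result = []
--     for word in extracted_words:
--         alpha_count = 0
--         for alpha in word:
--             if alpha in name_dic.keys() and word.count(alpha) <= name_dic.get(alpha):
--                 alpha_count += 1
--         if alpha_count == len(word):
--             result.append(word)
--     extracted_words = result
--     return extracted_words
-- ===== SOURCE B (Python) =====
-- def choose_word(extracted_words, name_dic):
--     return [w for w in extracted_words
--             if all(w.count(ch) <= name_dic.get(ch, 0) for ch in set(w))]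
-- ===== Notes on version B (the rewrite author's own statement) =====
-- stated objective: simpler
-- what changed: B is one comprehension that checks each DISTINCT letter of a word (set(w)) once against name_dic.get(ch, 0), instead of A's per-position loop that tests membership in keys(), accumulates a match counter and compares it to len(word).
import Mathlib
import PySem

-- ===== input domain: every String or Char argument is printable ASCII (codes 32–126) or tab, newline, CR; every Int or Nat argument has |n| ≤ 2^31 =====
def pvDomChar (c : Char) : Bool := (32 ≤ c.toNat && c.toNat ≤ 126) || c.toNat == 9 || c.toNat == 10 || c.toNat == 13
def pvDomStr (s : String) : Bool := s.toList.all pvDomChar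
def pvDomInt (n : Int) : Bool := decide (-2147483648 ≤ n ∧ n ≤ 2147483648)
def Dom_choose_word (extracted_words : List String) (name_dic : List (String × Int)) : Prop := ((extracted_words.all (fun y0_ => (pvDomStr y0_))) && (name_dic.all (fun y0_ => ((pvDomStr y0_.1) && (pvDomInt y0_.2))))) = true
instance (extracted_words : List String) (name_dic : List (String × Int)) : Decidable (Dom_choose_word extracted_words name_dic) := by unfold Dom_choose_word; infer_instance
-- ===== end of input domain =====

-- B checks each DISTINCT letter of a word once against its budget (default 0), instead of A's
-- per-position loop that accumulates a match counter and compares it to len(word) (objective: simpler).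

-- Python iteration over a string yields its characters as 1-character strings (shared by both ports).
def pyStrChars (w : String) : List String := w.toList.map (fun c => String.ofList [c])

-- ===== PORT A =====
def choose_word (extracted_words : List String) (name_dic : List (String × Int)) : List String :=
  let d : PySem.Dict String Int := PySem.Dict.mk name_dic
  extracted_words.foldl (fun result word =>
    let alpha_count : Int :=
      (pyStrChars word).foldl (fun ac alpha =>
        if d.contains alpha && decide ((PySem.Str.count word alpha : Int) ≤ d.getD alpha 0)
        then ac + 1 else ac) 0
    if alpha_count = (PySem.Str.len word : Int) then result ++ [word] else result) []

-- ===== PORT B =====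
-- all(...) over set(w): the result is order-independent, so iterating the Set is exact.
def choose_word_alt (extracted_words : List String) (name_dic : List (String × Int)) : List String :=
  extracted_words.filter (fun w =>
    (PySem.Set.ofList (pyStrChars w)).all (fun ch =>
      decide ((PySem.Str.count w ch : Int) ≤ (PySem.Dict.mk name_dic).getD ch 0)))

-- ===== PRECONDITION & SPEC =====
def Spec_choose_word (extracted_words : List String) (name_dic : List (String × Int)) (out : List String) : Prop := out = choose_word_alt extracted_words name_dic
instance (extracted_words : List String) (name_dic : List (String × Int)) (out : List String) : Decidable (Spec_choose_word extracted_words name_dic out) := by unfold Spec_choose_word; infer_instance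

-- ===== CLAIM (what is proved, stated in full; the proofs are below) =====
def Claim_equal_choose_word : Prop := ∀ (extracted_words : List String) (name_dic : List (String × Int)), Dom_choose_word extracted_words name_dic → Spec_choose_word extracted_words name_dic (choose_word extracted_words name_dic)

-- ===== LEMMAS AND PROOFS =====

-- Python's s.count(sub) for a single-character sub is the character count (no PySem lemma covers this bridge).
lemma count_go_single (c : Char) : ∀ (l : List Char) (fuel acc : Nat), l.length ≤ fuel →
    PySem.Chars.count.go [c] fuel l acc = acc + l.count c := by
  intro l
  induction l with
  | nil => intro fuel acc _; cases fuel <;> simp [PySem.Chars.count.go]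
  | cons h t ih =>
    intro fuel acc hle
    cases fuel with
    | zero => simp at hle
    | succ f =>
      have hf : t.length ≤ f := by simpa using hle
      rw [PySem.Chars.count.go]
      by_cases hc : c = h
      · subst hc
        simp only [List.isPrefixOf, List.length_singleton, List.drop_one]
        simp [ih f (acc+1) hf]
        omega
      · simp [List.isPrefixOf, hc, ih f acc hf, Ne.symm hc]

lemma str_count_single (w : String) (c : Char) :
    PySem.Str.count w (String.ofList [c]) = w.toList.count c := by
  have := count_go_single c w.toList w.toList.length 0 le_rfl
  simp [PySem.Str.count, PySem.Chars.count] at this ⊢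
  simpa [PySem.Str.len_eq] using this

-- per-word: A's "every position passes" test equals B's "every distinct letter fits its budget" test
lemma cond_eq (w : String) (nd : List (String × Int)) :
    (decide (((pyStrChars w).foldl (fun ac alpha =>
        if (PySem.Dict.mk nd).contains alpha &&
           decide ((PySem.Str.count w alpha : Int) ≤ (PySem.Dict.mk nd).getD alpha 0)
        then ac + 1 else ac) (0 : Int)) = (PySem.Str.len w : Int)))
    = (PySem.Set.ofList (pyStrChars w)).all (fun ch =>
        decide ((PySem.Str.count w ch : Int) ≤ (PySem.Dict.mk nd).getD ch 0)) := by
  rw [PySem.List.foldl_if_add_one]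
  rw [Bool.eq_iff_iff]
  simp only [List.all_eq_true, decide_eq_true_eq, PySem.Set.mem_ofList]
  rw [show ((PySem.Str.len w : Int)) = ((pyStrChars w).length : Int) by
        simp [PySem.Str.len_eq, pyStrChars]]
  rw [show ((0:Int) + ((pyStrChars w).countP _ : Int) = ((pyStrChars w).length : Int)) ↔
        ((pyStrChars w).countP (fun alpha =>
          (PySem.Dict.mk nd).contains alpha &&
          decide ((PySem.Str.count w alpha : Int) ≤ (PySem.Dict.mk nd).getD alpha 0)) =
          (pyStrChars w).length) by omega]
  rw [List.countP_eq_length]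
  constructor
  · intro hall k hk
    have := hall k hk
    simp only [Bool.and_eq_true, decide_eq_true_eq] at this
    exact this.2
  · intro hall a ha
    have h1 := hall a ha
    obtain ⟨c, hc, rfl⟩ := List.mem_map.mp ha
    have hpos : 0 < w.toList.count c := List.count_pos_iff.mpr hc
    have hcont : (PySem.Dict.mk nd).contains (String.ofList [c]) = true := by
      by_contra hfalse
      have hcf : (PySem.Dict.mk nd).contains (String.ofList [c]) = false :=
        Bool.not_eq_true _ ▸ (by simpa using hfalse)
      have h0 : (PySem.Dict.mk nd).getD (String.ofList [c]) 0 = 0 :=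
        PySem.Dict.getD_of_not_contains _ 0 hcf
      rw [h0, str_count_single] at h1
      omega
    simp only [Bool.and_eq_true, decide_eq_true_eq]
    exact ⟨hcont, h1⟩

-- ===== VERDICT (by name: the statement is the Claim_ definition above) =====
theorem choose_word_spec : Claim_equal_choose_word := by
  intro ws nd _
  show choose_word ws nd = choose_word_alt ws nd
  simp only [choose_word, choose_word_alt]
  rw [PySem.List.foldl_append_ite_eq_filter]
  simp only [List.nil_append]
  exact List.filter_congr (fun w _ => cond_eq w nd)
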